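-- pv_equiv track=rewrite | github.com/nobe0716/problem_solving | codejam/2020/1a/a.py | solve
-- ===== SOURCE A (Python) =====
-- def solve(p):
--     prefix = []
--     postfix = []
--     middle = []
--     for e in p:
--         tokens = e.split('*')
--         prefix.append(tokens[0])
--         postfix.append(tokens[-1])
--         if len(tokens) > 2:
--             middle += tokens[1:-1]
--
--     prefix.sort(key=len, reverse=True)
--     postfix.sort(key=len, reverse=True)
--
--     if any(not prefix[0].startswith(_) for _ in prefix):
--         return '*'
--     if any(not postfix[0].endswith(_) for _ in postfix):
--         return '*'
--
--     return prefix[0] + ''.join(middle) + postfix[0]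
-- ===== SOURCE B (Python) =====
-- def solve(p):
--     # single pass keeping a running longest prefix/postfix instead of
--     # collect-all + sort + global check
--     tokens = p[0].split('*')
--     best_pre, best_post = tokens[0], tokens[-1]
--     pre_ok = True
--     post_ok = True
--     middles = list(tokens[1:-1])
--     for e in p[1:]:
--         tokens = e.split('*')
--         a, b = tokens[0], tokens[-1]
--         if best_pre.startswith(a):
--             pass
--         elif a.startswith(best_pre):
--             best_pre = a
--         else:
--             pre_ok = False
--         if best_post.endswith(b):
--             pass
--         elif b.endswith(best_post):
--             best_post = b
--         else:
--             post_ok = False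
--         middles.extend(tokens[1:-1])
--     if not (pre_ok and post_ok):
--         return '*'
--     return best_pre + ''.join(middles) + best_post
-- ===== Notes on version B (the rewrite author's own statement) =====
-- stated objective: alternative
-- what changed: B makes a single pass keeping a running longest prefix/postfix (pairwise startswith/endswith checks against the running best) instead of A's collect-all, sort-by-length-descending, then global check against the sorted head.
import Mathlib
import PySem

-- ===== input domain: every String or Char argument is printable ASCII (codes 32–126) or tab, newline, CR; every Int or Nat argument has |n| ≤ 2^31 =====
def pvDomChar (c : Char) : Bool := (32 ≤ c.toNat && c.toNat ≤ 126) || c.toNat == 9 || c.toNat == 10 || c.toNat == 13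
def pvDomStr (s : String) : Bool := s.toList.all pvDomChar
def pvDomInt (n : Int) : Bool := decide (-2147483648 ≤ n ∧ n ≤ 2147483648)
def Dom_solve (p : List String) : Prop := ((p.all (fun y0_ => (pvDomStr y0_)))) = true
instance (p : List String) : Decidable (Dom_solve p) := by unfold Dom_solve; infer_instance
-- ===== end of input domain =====

-- B replaces A's collect-all / sort-by-length / global-check with a single pass that
-- maintains a running longest prefix and postfix (objective: alternative decomposition).

-- ===== PORT A =====
def solve (p : List String) : String :=
  let st := p.foldl (fun (st : List String × List String × List String) e =>
      let tokens := (PySem.Str.split? e "*").getD []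
      ( st.1 ++ [(PySem.List.pyGet? tokens 0).getD ""],
        st.2.1 ++ [(PySem.List.pyGet? tokens (-1)).getD ""],
        if tokens.length > 2 then st.2.2 ++ PySem.List.slice tokens (some 1) (some (-1)) else st.2.2))
    ([], [], [])
  let pre := PySem.List.sorted st.1 (fun s => PySem.Str.len s) true
  let post := PySem.List.sorted st.2.1 (fun s => PySem.Str.len s) true
  -- prefix[0] on empty p raises IndexError in Python; Pre_solve excludes p = []
  if pre.any (fun x => !(PySem.Str.startswith ((PySem.List.pyGet? pre 0).getD "") x)) then "*"
  else if post.any (fun x => !(PySem.Str.endswith ((PySem.List.pyGet? post 0).getD "") x)) then "*"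
  else ((PySem.List.pyGet? pre 0).getD "") ++ PySem.Str.join "" st.2.2 ++ ((PySem.List.pyGet? post 0).getD "")

-- ===== PORT B =====
def solve_alt (p : List String) : String :=
  -- p[0] on empty p raises IndexError in Python; Pre_solve excludes p = []
  let tokens0 := (PySem.Str.split? ((PySem.List.pyGet? p 0).getD "") "*").getD []
  let init : (String × Bool) × (String × Bool) × List String :=
    (((PySem.List.pyGet? tokens0 0).getD "", true),
     ((PySem.List.pyGet? tokens0 (-1)).getD "", true),
     PySem.List.slice tokens0 (some 1) (some (-1)))
  let st := (PySem.List.slice p (some 1) none).foldl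
    (fun (st : (String × Bool) × (String × Bool) × List String) e =>
      let tokens := (PySem.Str.split? e "*").getD []
      let a := (PySem.List.pyGet? tokens 0).getD ""
      let b := (PySem.List.pyGet? tokens (-1)).getD ""
      let pre := if PySem.Str.startswith st.1.1 a then st.1
                 else if PySem.Str.startswith a st.1.1 then (a, st.1.2)
                 else (st.1.1, false)
      let post := if PySem.Str.endswith st.2.1.1 b then st.2.1
                  else if PySem.Str.endswith b st.2.1.1 then (b, st.2.1.2)
                  else (st.2.1.1, false)
      (pre, post, st.2.2 ++ PySem.List.slice tokens (some 1) (some (-1)))) init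
  if !(st.1.2 && st.2.1.2) then "*"
  else st.1.1 ++ PySem.Str.join "" st.2.2 ++ st.2.1.1

-- ===== PRECONDITION & SPEC =====
-- Pre_solve excludes only the empty list, on which Python A raises IndexError (prefix[0]).
def Pre_solve (p : List String) : Prop := p ≠ []
instance (p : List String) : Decidable (Pre_solve p) := by unfold Pre_solve; infer_instance
def pvWitness_solve : List String := ["a*c*b", "ab*b"]
def Spec_solve (p : List String) (out : String) : Prop := out = solve_alt p
instance (p : List String) (out : String) : Decidable (Spec_solve p out) := by unfold Spec_solve; infer_instance

-- ===== CLAIM (what is proved, stated in full; the proofs are below) =====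
def Claim_equal_solve : Prop := ∀ (p : List String), Dom_solve p → Pre_solve p → Spec_solve p (solve p)

-- ===== LEMMAS AND PROOFS =====

-- token extraction shared by both proofs (the ports inline these expressions)
def pvTok (e : String) : List String := (PySem.Str.split? e "*").getD []
def pvF (e : String) : String := (PySem.List.pyGet? (pvTok e) 0).getD ""
def pvG (e : String) : String := (PySem.List.pyGet? (pvTok e) (-1)).getD ""
def pvM (e : String) : List String := PySem.List.slice (pvTok e) (some 1) (some (-1))

-- "x is below y": y starts (ends) with x
def pvBelowPre (x y : String) : Bool := PySem.Str.startswith y x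
def pvBelowPost (x y : String) : Bool := PySem.Str.endswith y x

-- one step of B's running-best update, abstracted over the order
def pvStep (below : String → String → Bool) (st : String × Bool) (a : String) : String × Bool :=
  if below a st.1 then st else if below st.1 a then (a, st.2) else (st.1, false)

lemma pvStep_false (below : String → String → Bool) (l : List String) (b : String) :
    (l.foldl (pvStep below) (b, false)).2 = false := by
  induction l generalizing b with
  | nil => rfl
  | cons a t ih =>
    simp only [List.foldl_cons, pvStep]
    split_ifs <;> exact ih _

lemma pvStep_inv (below : String → String → Bool)
    (htrans : ∀ x y z, below x y = true → below y z = true → below x z = true)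
    (hrefl : ∀ x, below x x = true) :
    ∀ (l : List String) (b b' : String),
      l.foldl (pvStep below) (b, true) = (b', true) →
      b' ∈ b :: l ∧ ∀ x ∈ b :: l, below x b' = true := by
  intro l
  induction l with
  | nil =>
    intro b b' h
    simp only [List.foldl_nil, Prod.mk.injEq] at h
    obtain ⟨rfl, -⟩ := h
    refine ⟨List.mem_singleton.mpr rfl, ?_⟩
    intro x hx
    rw [List.mem_singleton] at hx; subst hx; exact hrefl _
  | cons a t ih =>
    intro b b' h
    simp only [List.foldl_cons, pvStep] at h
    by_cases h1 : below a b = true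
    · rw [if_pos h1] at h
      obtain ⟨hmem, hall⟩ := ih b b' h
      have hb : below b b' = true := hall b (List.mem_cons_self ..)
      constructor
      · rcases List.mem_cons.mp hmem with rfl | h'
        · exact List.mem_cons_self ..
        · exact List.mem_cons_of_mem _ (List.mem_cons_of_mem _ h')
      · intro x hx
        rcases List.mem_cons.mp hx with rfl | hx'
        · exact hall x (List.mem_cons_self ..)
        · rcases List.mem_cons.mp hx' with rfl | hx''
          · exact htrans _ _ _ h1 hb
          · exact hall x (List.mem_cons_of_mem _ hx'')
    · rw [if_neg h1] at h
      by_cases h2 : below b a = true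
      · rw [if_pos h2] at h
        obtain ⟨hmem, hall⟩ := ih a b' h
        have ha : below a b' = true := hall a (List.mem_cons_self ..)
        constructor
        · rcases List.mem_cons.mp hmem with rfl | h'
          · exact List.mem_cons_of_mem _ (List.mem_cons_self ..)
          · exact List.mem_cons_of_mem _ (List.mem_cons_of_mem _ h')
        · intro x hx
          rcases List.mem_cons.mp hx with rfl | hx'
          · exact htrans _ _ _ h2 ha
          · exact hall x hx'
      · rw [if_neg h2] at h
        have hf := pvStep_false below t b
        rw [h] at hf
        simp at hf

lemma pvStep_complete (below : String → String → Bool)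
    (hcomp : ∀ x y m, below x m = true → below y m = true → below x y = true ∨ below y x = true) :
    ∀ (l : List String) (b m : String), below b m = true → (∀ x ∈ l, below x m = true) →
      ∃ b', l.foldl (pvStep below) (b, true) = (b', true) ∧ below b' m = true := by
  intro l
  induction l with
  | nil => intro b m hb _; exact ⟨b, rfl, hb⟩
  | cons a t ih =>
    intro b m hb hall
    have ha : below a m = true := hall a (List.mem_cons_self ..)
    have hall' : ∀ x ∈ t, below x m = true := fun x hx => hall x (List.mem_cons_of_mem _ hx)
    simp only [List.foldl_cons, pvStep]
    rcases hcomp a b m ha hb with h | h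
    · rw [if_pos h]; exact ih b m hb hall'
    · by_cases h1 : below a b = true
      · rw [if_pos h1]; exact ih b m hb hall'
      · rw [if_neg (by simp [h1]), if_pos h]; exact ih a m ha hall'

-- the core theorem: B's running best agrees with (check against) the longest element m
lemma pvMain (below : String → String → Bool)
    (hrefl : ∀ x, below x x = true)
    (htrans : ∀ x y z, below x y = true → below y z = true → below x z = true)
    (hcomp : ∀ x y m, below x m = true → below y m = true → below x y = true ∨ below y x = true)
    (heq : ∀ x y, below x y = true → PySem.Str.len y ≤ PySem.Str.len x → x = y)
    (b : String) (t : List String) (m : String)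
    (hm : m ∈ b :: t) (hmax : ∀ x ∈ b :: t, PySem.Str.len x ≤ PySem.Str.len m) :
    ((∀ x ∈ b :: t, below x m = true) → t.foldl (pvStep below) (b, true) = (m, true)) ∧
    ((t.foldl (pvStep below) (b, true)).2 = true → ∀ x ∈ b :: t, below x m = true) := by
  constructor
  · intro hall
    obtain ⟨b', hfold, hbm⟩ := pvStep_complete below hcomp t b m
      (hall b (List.mem_cons_self ..)) (fun x hx => hall x (List.mem_cons_of_mem _ hx))
    obtain ⟨hmem, hallb⟩ := pvStep_inv below htrans hrefl t b b' hfold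
    have hmb : below m b' = true := hallb m hm
    have : m = b' := heq m b' hmb (hmax b' hmem)
    rw [hfold, this]
  · intro hok
    have hfold : t.foldl (pvStep below) (b, true) = ((t.foldl (pvStep below) (b, true)).1, true) := by
      conv_lhs => rw [← Prod.mk.eta (p := t.foldl (pvStep below) (b, true))]
      rw [hok]
    obtain ⟨hmem, hallb⟩ := pvStep_inv below htrans hrefl t b _ hfold
    have hmb : below m _ = true := hallb m hm
    have hme : m = (t.foldl (pvStep below) (b, true)).1 := heq m _ hmb (hmax _ hmem)
    intro x hx
    rw [hme]
    exact hallb x hx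

-- properties of the two orders
lemma pre_refl (x : String) : pvBelowPre x x = true := by
  simp [pvBelowPre, PySem.Chars.startswith_iff]
lemma pre_trans (x y z : String) (h1 : pvBelowPre x y = true) (h2 : pvBelowPre y z = true) :
    pvBelowPre x z = true := by
  simp only [pvBelowPre, PySem.Str.startswith_eq, PySem.Chars.startswith_iff] at *
  exact h1.trans h2
lemma pre_comp (x y m : String) (h1 : pvBelowPre x m = true) (h2 : pvBelowPre y m = true) :
    pvBelowPre x y = true ∨ pvBelowPre y x = true := by
  simp only [pvBelowPre, PySem.Str.startswith_eq, PySem.Chars.startswith_iff] at *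
  exact List.prefix_or_prefix_of_prefix h1 h2
lemma pre_eq (x y : String) (h : pvBelowPre x y = true)
    (hl : PySem.Str.len y ≤ PySem.Str.len x) : x = y := by
  simp only [pvBelowPre, PySem.Str.startswith_eq, PySem.Chars.startswith_iff] at h
  simp only [PySem.Str.len, Nat.cast_le] at hl
  exact String.toList_inj.mp (h.eq_of_length_le hl)

lemma post_refl (x : String) : pvBelowPost x x = true := by
  simp [pvBelowPost, PySem.Chars.endswith_iff]
lemma post_trans (x y z : String) (h1 : pvBelowPost x y = true) (h2 : pvBelowPost y z = true) :
    pvBelowPost x z = true := by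
  simp only [pvBelowPost, PySem.Str.endswith_eq, PySem.Chars.endswith_iff] at *
  exact h1.trans h2
lemma post_comp (x y m : String) (h1 : pvBelowPost x m = true) (h2 : pvBelowPost y m = true) :
    pvBelowPost x y = true ∨ pvBelowPost y x = true := by
  simp only [pvBelowPost, PySem.Str.endswith_eq, PySem.Chars.endswith_iff] at *
  exact List.suffix_or_suffix_of_suffix h1 h2
lemma post_eq (x y : String) (h : pvBelowPost x y = true)
    (hl : PySem.Str.len y ≤ PySem.Str.len x) : x = y := by
  simp only [pvBelowPost, PySem.Str.endswith_eq, PySem.Chars.endswith_iff] at h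
  simp only [PySem.Str.len, Nat.cast_le] at hl
  have : x.toList.length = y.toList.length := le_antisymm h.length_le hl
  exact String.toList_inj.mp (h.eq_of_length this)

-- xs[1:-1] is empty when xs has at most 2 elements (A's len(tokens) > 2 guard is redundant)
lemma pvSlice_small (l : List String) (h : ¬ l.length > 2) :
    PySem.List.slice l (some 1) (some (-1)) = [] := by
  match l with
  | [] => rfl
  | [a] => rfl
  | [a, b] => rfl
  | a :: b :: c :: t => simp at h

-- A's collecting loop produces the three mapped lists
lemma pvAfold (p : List String) (x y z : List String) :
    p.foldl (fun (st : List String × List String × List String) e =>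
      let tokens := (PySem.Str.split? e "*").getD []
      ( st.1 ++ [(PySem.List.pyGet? tokens 0).getD ""],
        st.2.1 ++ [(PySem.List.pyGet? tokens (-1)).getD ""],
        if tokens.length > 2 then st.2.2 ++ PySem.List.slice tokens (some 1) (some (-1)) else st.2.2))
      (x, y, z)
    = (x ++ p.map pvF, y ++ p.map pvG, z ++ (p.map pvM).flatten) := by
  induction p generalizing x y z with
  | nil => simp
  | cons e t ih =>
    simp only [List.foldl_cons, List.map_cons, List.flatten_cons]
    rw [ih]
    by_cases h : ((PySem.Str.split? e "*").getD []).length > 2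
    · simp [pvF, pvG, pvM, pvTok, h, List.append_assoc]
    · rw [if_neg h]
      have hz : pvM e = [] := pvSlice_small _ h
      simp only [pvF, pvG, pvM, pvTok] at *
      rw [hz]
      simp [List.append_assoc]

-- B's single loop splits into two independent running-best folds plus the middles
lemma pvBfold (l : List String) (s1 s2 : String × Bool) (ms : List String) :
    l.foldl (fun (st : (String × Bool) × (String × Bool) × List String) e =>
      let tokens := (PySem.Str.split? e "*").getD []
      let a := (PySem.List.pyGet? tokens 0).getD ""
      let b := (PySem.List.pyGet? tokens (-1)).getD ""
      let pre := if PySem.Str.startswith st.1.1 a then st.1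
                 else if PySem.Str.startswith a st.1.1 then (a, st.1.2)
                 else (st.1.1, false)
      let post := if PySem.Str.endswith st.2.1.1 b then st.2.1
                  else if PySem.Str.endswith b st.2.1.1 then (b, st.2.1.2)
                  else (st.2.1.1, false)
      (pre, post, st.2.2 ++ PySem.List.slice tokens (some 1) (some (-1)))) (s1, s2, ms)
    = ((l.map pvF).foldl (pvStep pvBelowPre) s1,
       (l.map pvG).foldl (pvStep pvBelowPost) s2,
       ms ++ (l.map pvM).flatten) := by
  induction l generalizing s1 s2 ms with
  | nil => simp
  | cons e t ih =>
    simp only [List.foldl_cons, List.map_cons, List.flatten_cons]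
    rw [ih]
    simp only [pvStep, pvBelowPre, pvBelowPost, pvF, pvG, pvM, pvTok, List.append_assoc]

-- any-over-sorted equals any-over-original
lemma pvAny_sorted (L : List String) (f : String → Bool) :
    (PySem.List.sorted L (fun s => PySem.Str.len s) true).any f = L.any f := by
  rw [Bool.eq_iff_iff]
  simp only [List.any_eq_true, PySem.List.mem_sorted]

-- ===== VERDICT (by name: the statement is the Claim_ definition above) =====
theorem solve_spec : Claim_equal_solve := by
  intro p _ hpre
  unfold Spec_solve
  match p with
  | [] => exact absurd rfl hpre
  | e0 :: rest =>
    show solve (e0 :: rest) = solve_alt (e0 :: rest)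
    rw [solve, solve_alt]
    simp only [pvAfold, pvBfold, List.nil_append, PySem.List.slice_from_one, List.tail_cons,
      PySem.List.pyGet?_zero_cons, Option.getD_some]
    -- name the two mapped lists
    set L1 := (e0 :: rest).map pvF with hL1
    set L2 := (e0 :: rest).map pvG with hL2
    have hL1c : L1 = pvF e0 :: rest.map pvF := by simp [hL1]
    have hL2c : L2 = pvG e0 :: rest.map pvG := by simp [hL2]
    -- heads of the sorted lists
    obtain ⟨m1, t1, hs1⟩ : ∃ m t, PySem.List.sorted L1 (fun s => PySem.Str.len s) true = m :: t := by
      have : (PySem.List.sorted L1 (fun s => PySem.Str.len s) true).length = L1.length :=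
        PySem.List.length_sorted ..
      cases hs : PySem.List.sorted L1 (fun s => PySem.Str.len s) true with
      | nil => rw [hs] at this; simp [hL1c] at this
      | cons m t => exact ⟨m, t, rfl⟩
    obtain ⟨m2, t2, hs2⟩ : ∃ m t, PySem.List.sorted L2 (fun s => PySem.Str.len s) true = m :: t := by
      have : (PySem.List.sorted L2 (fun s => PySem.Str.len s) true).length = L2.length :=
        PySem.List.length_sorted ..
      cases hs : PySem.List.sorted L2 (fun s => PySem.Str.len s) true with
      | nil => rw [hs] at this; simp [hL2c] at this
      | cons m t => exact ⟨m, t, rfl⟩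
    have hm1 : m1 ∈ L1 := by
      rw [← PySem.List.mem_sorted L1 (fun s => PySem.Str.len s) true, hs1]; exact List.mem_cons_self ..
    have hm2 : m2 ∈ L2 := by
      rw [← PySem.List.mem_sorted L2 (fun s => PySem.Str.len s) true, hs2]; exact List.mem_cons_self ..
    have hmax1 : ∀ x ∈ L1, PySem.Str.len x ≤ PySem.Str.len m1 :=
      PySem.List.key_head_sorted_rev_ge L1 (fun s => PySem.Str.len s) hs1
    have hmax2 : ∀ x ∈ L2, PySem.Str.len x ≤ PySem.Str.len m2 :=
      PySem.List.key_head_sorted_rev_ge L2 (fun s => PySem.Str.len s) hs2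
    rw [hL1c] at hm1 hmax1
    rw [hL2c] at hm2 hmax2
    have main1 := pvMain pvBelowPre pre_refl pre_trans pre_comp pre_eq
      (pvF e0) (rest.map pvF) m1 hm1 hmax1
    have main2 := pvMain pvBelowPost post_refl post_trans post_comp post_eq
      (pvG e0) (rest.map pvG) m2 hm2 hmax2
    rw [pvAny_sorted L1, pvAny_sorted L2, hs1, hs2]
    simp only [show ((PySem.List.pyGet? ((PySem.Str.split? e0 "*").getD []) 0).getD "") = pvF e0 from rfl,
      show ((PySem.List.pyGet? ((PySem.Str.split? e0 "*").getD []) (-1)).getD "") = pvG e0 from rfl,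
      show PySem.List.slice ((PySem.Str.split? e0 "*").getD []) (some 1) (some (-1)) = pvM e0 from rfl]
    simp only [PySem.List.pyGet?_zero_cons, Option.getD_some]
    -- translate the any-checks
    have hiff1 : L1.any (fun x => !(PySem.Str.startswith m1 x)) = false ↔
        (∀ x ∈ pvF e0 :: rest.map pvF, pvBelowPre x m1 = true) := by
      rw [hL1c]
      simp [List.any_eq_false, pvBelowPre]
    have hiff2 : L2.any (fun x => !(PySem.Str.endswith m2 x)) = false ↔
        (∀ x ∈ pvG e0 :: rest.map pvG, pvBelowPost x m2 = true) := by
      rw [hL2c]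
      simp [List.any_eq_false, pvBelowPost]
    by_cases h1 : L1.any (fun x => !(PySem.Str.startswith m1 x)) = true
    · -- A returns '*'; B's pre_ok must be false
      rw [if_pos]
      · have hnot : ¬ (∀ x ∈ pvF e0 :: rest.map pvF, pvBelowPre x m1 = true) := by
          intro hall
          rw [← hiff1] at hall
          rw [hall] at h1; exact Bool.false_ne_true h1
        have hok : ((rest.map pvF).foldl (pvStep pvBelowPre) (pvF e0, true)).2 = false := by
          by_contra hok
          exact hnot (main1.2 (by simpa using hok))
        rw [if_pos]
        simp [hok]
      · exact h1
    · rw [if_neg h1]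
      have hall1 : ∀ x ∈ pvF e0 :: rest.map pvF, pvBelowPre x m1 = true :=
        hiff1.mp (Bool.not_eq_true _ ▸ (by simpa using h1))
      have hfold1 := main1.1 hall1
      by_cases h2 : L2.any (fun x => !(PySem.Str.endswith m2 x)) = true
      · rw [if_pos h2]
        have hnot : ¬ (∀ x ∈ pvG e0 :: rest.map pvG, pvBelowPost x m2 = true) := by
          intro hall
          rw [← hiff2] at hall
          rw [hall] at h2; exact Bool.false_ne_true h2
        have hok : ((rest.map pvG).foldl (pvStep pvBelowPost) (pvG e0, true)).2 = false := by
          by_contra hok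
          exact hnot (main2.2 (by simpa using hok))
        rw [if_pos]
        simp [hfold1, hok]
      · rw [if_neg h2]
        have hall2 : ∀ x ∈ pvG e0 :: rest.map pvG, pvBelowPost x m2 = true :=
          hiff2.mp (by simpa using h2)
        have hfold2 := main2.1 hall2
        rw [if_neg]
        · simp [hfold1, hfold2]
        · simp [hfold1, hfold2]
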